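-- pv_equiv track=rewrite | github.com/Irfan-Ansari-stm/DSA_sheetinpythonLB | Array/cyc_rot_by_one.py | cyc_rot_by_one
-- ===== SOURCE A (Python) =====
-- def cyc_rot_by_one(arr):
--     if len(arr)<=1:
--         return arr
--     last_ele=arr[-1]
--     for i in range(len(arr)-1,0,-1):
--         arr[i]=arr[i-1]
--     arr[0]=last_ele
--     return arr
-- ===== SOURCE B (Python) =====
-- def cyc_rot_by_one(arr):
--     arr[:] = arr[-1:] + arr[:-1]
--     return arr
-- ===== Notes on version B (the rewrite author's own statement) =====
-- stated objective: simpler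
-- what changed: Replaces the explicit backward element-shifting loop (plus length guard) with a single in-place slice assignment arr[:] = arr[-1:] + arr[:-1].
import Mathlib
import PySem

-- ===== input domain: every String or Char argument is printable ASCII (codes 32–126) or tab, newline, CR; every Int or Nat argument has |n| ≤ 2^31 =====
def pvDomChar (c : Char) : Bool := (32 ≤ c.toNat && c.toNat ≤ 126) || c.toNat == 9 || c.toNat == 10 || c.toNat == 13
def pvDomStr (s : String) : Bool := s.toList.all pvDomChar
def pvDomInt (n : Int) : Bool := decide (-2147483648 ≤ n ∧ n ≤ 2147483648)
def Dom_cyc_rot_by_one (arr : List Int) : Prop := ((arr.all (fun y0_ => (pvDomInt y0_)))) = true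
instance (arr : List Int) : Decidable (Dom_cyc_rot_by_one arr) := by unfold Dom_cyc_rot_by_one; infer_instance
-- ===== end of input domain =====

-- B replaces A's backward shifting loop by one slice concatenation (one honest line: simpler decomposition, same cost).
-- A mutates its argument in place (Python); the equivalence proved here is about the RETURN value only.
-- ===== PORT A =====
def cyc_rot_by_one (arr : List Int) : List Int :=
  if arr.length ≤ 1 then arr
  else
    let last_ele := PySem.List.pyGetD arr (-1) 0
    let arr' := (PySem.List.pyRange ((arr.length : Int) - 1) 0 (-1)).foldl
      (fun a i => PySem.List.pySetD a i (PySem.List.pyGetD a (i - 1) 0)) arr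
    PySem.List.pySetD arr' 0 last_ele

-- ===== PORT B =====
def cyc_rot_by_one_alt (arr : List Int) : List Int :=
  PySem.List.slice arr (some (-1)) none ++ PySem.List.slice arr none (some (-1))

-- ===== PRECONDITION & SPEC =====
def Spec_cyc_rot_by_one (arr : List Int) (out : List Int) : Prop := out = cyc_rot_by_one_alt arr
instance (arr : List Int) (out : List Int) : Decidable (Spec_cyc_rot_by_one arr out) := by unfold Spec_cyc_rot_by_one; infer_instance

-- ===== CLAIM (what is proved, stated in full; the proofs are below) =====
def Claim_equal_cyc_rot_by_one : Prop := ∀ (arr : List Int), Dom_cyc_rot_by_one arr → Spec_cyc_rot_by_one arr (cyc_rot_by_one arr)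

-- ===== LEMMAS AND PROOFS =====

-- Loop characterisation: the countdown loop `for i in range(m,0,-1): a[i]=a[i-1]`
-- sends s to s.take 1 ++ s.take m ++ s.drop (m+1)  (for m < s.length).
lemma loop_shift (m : Nat) : ∀ (s : List Int), m < s.length →
    (PySem.List.pyRange (m : Int) 0 (-1)).foldl
      (fun a i => PySem.List.pySetD a i (PySem.List.pyGetD a (i - 1) 0)) s
    = s.take 1 ++ s.take m ++ s.drop (m + 1) := by
  induction m with
  | zero =>
    intro s hs
    rw [PySem.List.pyRange_neg_one_eq_nil (by omega)]
    cases s with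
    | nil => simp at hs
    | cons a t => simp
  | succ m ih =>
    intro s hs
    rw [show ((m + 1 : Nat) : Int) = (m : Int) + 1 by push_cast; ring,
        PySem.List.pyRange_neg_one_cons (by positivity)]
    simp only [List.foldl_cons, add_sub_cancel_right]
    have hstep : PySem.List.pySetD s ((m : Int) + 1) (PySem.List.pyGetD s (m : Int) 0)
        = s.set (m + 1) (s.getD m 0) := by
      rw [PySem.List.pyGetD_natCast, PySem.List.pySetD_of_nonneg _ _ (by positivity)]
      congr 1
    rw [hstep, ih _ (by simpa using Nat.lt_of_succ_lt hs)]
    have hm1 : m + 1 < s.length := hs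
    have hgd : s.getD m 0 = s[m] := List.getD_eq_getElem s 0 (by omega)
    apply List.ext_getElem
    · simp; omega
    · intro i h1 h2
      simp only [List.getElem_append, List.getElem_take, List.getElem_drop,
        List.getElem_set, List.length_take, List.length_set, List.length_append, hgd] at *
      split_ifs at * <;> first | omega | rfl | (congr 1 <;> omega)

-- ===== VERDICT (by name: the statement is the Claim_ definition above) =====
theorem cyc_rot_by_one_spec : Claim_equal_cyc_rot_by_one := by
  intro arr _
  unfold Spec_cyc_rot_by_one cyc_rot_by_one cyc_rot_by_one_alt
  rw [PySem.List.slice_from_neg_one, PySem.List.slice_to_neg_one]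
  by_cases h : arr.length ≤ 1
  · rw [if_pos h]
    match arr, h with
    | [], _ => rfl
    | [x], _ => rfl
  · rw [if_neg h]
    dsimp only
    have hn : 1 < arr.length := by omega
    have hm : arr.length - 1 < arr.length := by omega
    rw [show ((arr.length : Int) - 1) = ((arr.length - 1 : Nat) : Int) by omega]
    rw [loop_shift (arr.length - 1) arr hm]
    have hlast : PySem.List.pyGetD arr (-1) 0 = arr[arr.length - 1] := by
      simp only [PySem.List.pyGetD, PySem.List.pyGet?, PySem.List.pyIdx?]
      rw [if_neg (by omega), if_pos (by omega : -(arr.length : Int) ≤ -1)]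
      norm_num
      rw [List.getElem?_eq_getElem hm]
      rfl
    have hdrop : arr.drop (arr.length - 1) = [arr[arr.length - 1]] := by
      apply List.ext_getElem
      · simp; omega
      · intro i h1 h2
        simp only [List.getElem_drop] at *
        have hi : i = 0 := by simp at h2; omega
        subst hi
        simp
    rw [hlast, hdrop, show arr.length - 1 + 1 = arr.length by omega,
        List.drop_length, List.append_nil]
    rw [show (0 : Int) = ((0 : Nat) : Int) from rfl, PySem.List.pySetD_natCast]
    cases arr with
    | nil => simp at hn
    | cons a t =>
      simp only [List.take_succ_cons, List.take_zero, List.cons_append, List.nil_append,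
        List.set_cons_zero]
      congr 1
      exact List.dropLast_eq_take.symm
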